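-- pv_equiv track=rewrite | github.com/jddunn/tenets | tenets/core/analysis/implementations/generic_analyzer.py | _calculate_max_indent
-- ===== SOURCE A (Python) =====
-- from typing import List, Dict, Any, Optional
--
-- def _calculate_max_indent(lines: List[str]) -> int:
--     """Estimate maximum logical indentation level based on spaces/tabs."""
--     # Determine common indent size (2 or 4), fallback 4
--     sizes: Dict[int, int] = {}
--     for ln in lines:
--         if ln.startswith(" "):
--             count = len(ln) - len(ln.lstrip(" "))
--             if count:
--                 sizes[count] = sizes.get(count, 0) + 1
--     # Pick the most common divisor of 2 or 4
--     indent_unit = 4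
--     if sizes:
--         freq_pairs = sorted(sizes.items(), key=lambda x: x[1], reverse=True)
--         for size, _ in freq_pairs:
--             if size % 2 == 0:
--                 indent_unit = 2 if size % 2 == 0 and size % 4 != 0 else 4
--                 break
--     level = 0
--     max_level = 0
--     for ln in lines:
--         if not ln.strip():
--             continue
--         if ln.startswith("\t"):
--             # Treat tab as one level
--             level = ln.count("\t")
--         else:
--             spaces = len(ln) - len(ln.lstrip(" "))
--             level = spaces // indent_unit if indent_unit else 0
--         if level > max_level:
--             max_level = level
--     return max_level
-- ===== SOURCE B (Python) =====
-- def _calculate_max_indent(lines):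
--     """Estimate maximum logical indentation level based on spaces/tabs."""
--     sizes = {}
--     for ln in lines:
--         if ln.startswith(" "):
--             count = len(ln) - len(ln.lstrip(" "))
--             if count:
--                 sizes[count] = sizes.get(count, 0) + 1
--     # Single argmax scan over even widths (first-inserted wins ties) replaces the sort.
--     best_size, best_freq = 0, 0
--     for size, freq in sizes.items():
--         if size % 2 == 0 and freq > best_freq:
--             best_size, best_freq = size, freq
--     indent_unit = 2 if best_size % 4 else 4
--     max_level = 0
--     for ln in lines:
--         if not ln.strip():
--             continue
--         if ln.startswith("\t"):
--             level = ln.count("\t")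
--         else:
--             level = (len(ln) - len(ln.lstrip(" "))) // indent_unit
--         max_level = max(max_level, level)
--     return max_level
-- ===== Notes on version B (the rewrite author's own statement) =====
-- stated objective: simpler
-- what changed: B keeps the frequency-dict pass but replaces A's stable descending sort plus scan-for-first-even-width by a single first-wins strict argmax over the dict's even widths, and replaces A's (level, max_level) pair-state second loop by a plain running max.
import Mathlib
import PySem

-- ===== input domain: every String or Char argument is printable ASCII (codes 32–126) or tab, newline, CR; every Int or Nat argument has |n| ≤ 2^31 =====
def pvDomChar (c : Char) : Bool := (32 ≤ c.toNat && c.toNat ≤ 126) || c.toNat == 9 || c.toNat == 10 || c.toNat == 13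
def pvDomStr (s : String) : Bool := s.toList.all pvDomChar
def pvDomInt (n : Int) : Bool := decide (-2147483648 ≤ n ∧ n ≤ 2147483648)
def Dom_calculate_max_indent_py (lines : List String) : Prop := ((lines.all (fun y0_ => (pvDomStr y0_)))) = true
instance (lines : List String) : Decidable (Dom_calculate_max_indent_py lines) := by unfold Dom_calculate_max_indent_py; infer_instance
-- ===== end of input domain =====

-- B replaces A's sort-then-scan choice of the indent unit by a single first-wins argmax scan
-- over the frequency dict, and folds the second pass with a plain running max (objective: simpler).

-- ===== PORT A =====
-- len(ln) - len(ln.lstrip(" ")) : lstrip(" ") drops exactly the leading ' ' characters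
-- (exact hand port: dropWhile (· == ' ') on the code points).
def pvLeadSpaces (ln : String) : Int :=
  PySem.Str.len ln - ((ln.toList.dropWhile (fun c => c == ' ')).length : Int)

-- the 'for ln in lines: ... sizes[count] = sizes.get(count, 0) + 1' loop (identical in A and B)
def pvSizes (lines : List String) : PySem.Dict Int Int :=
  lines.foldl (fun sizes ln =>
    if PySem.Str.startswith ln " " then
      let count := pvLeadSpaces ln
      if count ≠ 0 then sizes.insert count (sizes.getD count 0 + 1) else sizes
    else sizes) PySem.Dict.empty

-- 'for size, _ in freq_pairs: if size % 2 == 0: indent_unit = ...; break'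
def pvPickUnit : List (Int × Int) → Int
  | [] => 4
  | (size, _) :: rest =>
    if PySem.Int.mod size 2 = 0 then
      if PySem.Int.mod size 2 = 0 ∧ PySem.Int.mod size 4 ≠ 0 then 2 else 4
    else pvPickUnit rest

def calculate_max_indent_py (lines : List String) : Int :=
  let sizes := pvSizes lines
  let indent_unit : Int :=
    if sizes.items ≠ [] then
      pvPickUnit (PySem.List.sorted sizes.items (fun x => x.2) true)
    else 4
  let st :=
    lines.foldl (fun (st : Int × Int) ln =>
      if PySem.Str.strip ln = "" then st
      else
        let level : Int :=
          if PySem.Str.startswith ln "\t" then (PySem.Str.count ln "\t" : Int)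
          else if indent_unit ≠ 0 then PySem.Int.floordiv (pvLeadSpaces ln) indent_unit else 0
        if level > st.2 then (level, level) else (level, st.2)) ((0 : Int), (0 : Int))
  st.2

-- ===== PORT B =====
def calculate_max_indent_py_alt (lines : List String) : Int :=
  let sizes := pvSizes lines
  let best : Int × Int :=
    sizes.items.foldl (fun best p =>
      if PySem.Int.mod p.1 2 = 0 ∧ best.2 < p.2 then p else best) ((0 : Int), (0 : Int))
  let indent_unit : Int := if PySem.Int.mod best.1 4 ≠ 0 then 2 else 4
  lines.foldl (fun max_level ln =>
    if PySem.Str.strip ln = "" then max_level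
    else
      let level : Int :=
        if PySem.Str.startswith ln "\t" then (PySem.Str.count ln "\t" : Int)
        else PySem.Int.floordiv (pvLeadSpaces ln) indent_unit
      max max_level level) 0

-- ===== PRECONDITION & SPEC =====
def Spec_calculate_max_indent_py (lines : List String) (out : Int) : Prop := out = calculate_max_indent_py_alt lines
instance (lines : List String) (out : Int) : Decidable (Spec_calculate_max_indent_py lines out) := by unfold Spec_calculate_max_indent_py; infer_instance

-- ===== CLAIM (what is proved, stated in full; the proofs are below) =====
def Claim_equal_calculate_max_indent_py : Prop := ∀ (lines : List String), Dom_calculate_max_indent_py lines → Spec_calculate_max_indent_py lines (calculate_max_indent_py lines)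

-- ===== LEMMAS AND PROOFS =====

-- proof-side names for the pieces of the two ports
def pvBf (a b : Int × Int) : Bool := decide ((fun x : Int × Int => x.2) b < (fun x : Int × Int => x.2) a)

def pvE (p : Int × Int) : Bool := decide (PySem.Int.mod p.1 2 = 0)

def pvG (b p : Int × Int) : Int × Int :=
  if PySem.Int.mod p.1 2 = 0 ∧ b.2 < p.2 then p else b

def pvUnitA (lines : List String) : Int :=
  if (pvSizes lines).items ≠ [] then
    pvPickUnit (PySem.List.sorted (pvSizes lines).items (fun x => x.2) true)
  else 4

def pvBest (lines : List String) : Int × Int :=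
  (pvSizes lines).items.foldl pvG ((0 : Int), (0 : Int))

def pvUnitB (lines : List String) : Int :=
  if PySem.Int.mod (pvBest lines).1 4 ≠ 0 then 2 else 4

def pvFA (u : Int) (st : Int × Int) (ln : String) : Int × Int :=
  if PySem.Str.strip ln = "" then st
  else
    let level : Int :=
      if PySem.Str.startswith ln "\t" then (PySem.Str.count ln "\t" : Int)
      else if u ≠ 0 then PySem.Int.floordiv (pvLeadSpaces ln) u else 0
    if level > st.2 then (level, level) else (level, st.2)

def pvFB (u : Int) (m : Int) (ln : String) : Int :=
  if PySem.Str.strip ln = "" then m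
  else
    let level : Int :=
      if PySem.Str.startswith ln "\t" then (PySem.Str.count ln "\t" : Int)
      else PySem.Int.floordiv (pvLeadSpaces ln) u
    max m level

lemma pvA_unfold (lines : List String) :
    calculate_max_indent_py lines = (lines.foldl (pvFA (pvUnitA lines)) ((0 : Int), (0 : Int))).2 := rfl

lemma pvB_unfold (lines : List String) :
    calculate_max_indent_py_alt lines = lines.foldl (pvFB (pvUnitB lines)) 0 := rfl

-- descending order (by the count) is preserved by insertBy with pvBf
lemma pvPairwise_insertBy (x : Int × Int) (acc : List (Int × Int))
    (h : acc.Pairwise (fun a c => c.2 ≤ a.2)) :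
    (PySem.List.insertBy pvBf x acc).Pairwise (fun a c => c.2 ≤ a.2) := by
  induction acc with
  | nil => simp [PySem.List.insertBy]
  | cons y ys ih =>
    rw [List.pairwise_cons] at h
    by_cases hb : pvBf x y = true
    · rw [show PySem.List.insertBy pvBf x (y :: ys) = x :: y :: ys from by
        simp [PySem.List.insertBy, hb]]
      have hxy : y.2 < x.2 := by simpa [pvBf] using hb
      refine List.pairwise_cons.mpr ⟨?_, List.pairwise_cons.mpr h⟩
      intro z hz
      rcases List.mem_cons.mp hz with rfl | hz
      · omega
      · have := h.1 z hz; omega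
    · rw [show PySem.List.insertBy pvBf x (y :: ys) = y :: PySem.List.insertBy pvBf x ys from by
        simp [PySem.List.insertBy, Bool.eq_false_iff.mpr hb]]
      refine List.pairwise_cons.mpr ⟨?_, ih h.2⟩
      intro z hz
      rcases (PySem.List.mem_insertBy _ _ _ _).mp hz with hzx | hz
      · have hle : ¬ y.2 < x.2 := by simpa [pvBf] using hb
        rw [hzx]; omega
      · exact h.1 z hz

-- first even entry of a stable-descending-sorted list, through one insertion
lemma pvFind?_insertBy (x : Int × Int) (acc : List (Int × Int))
    (h : acc.Pairwise (fun a c => c.2 ≤ a.2)) :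
    (PySem.List.insertBy pvBf x acc).find? pvE =
      if pvE x then
        match acc.find? pvE with
        | none => some x
        | some q => if q.2 < x.2 then some x else some q
      else acc.find? pvE := by
  induction acc with
  | nil =>
    rw [show PySem.List.insertBy pvBf x [] = [x] from by simp [PySem.List.insertBy]]
    cases hE : pvE x <;> simp [List.find?, hE]
  | cons y ys ih =>
    rw [List.pairwise_cons] at h
    by_cases hb : pvBf x y = true
    · have hxy : y.2 < x.2 := by simpa [pvBf] using hb
      rw [show PySem.List.insertBy pvBf x (y :: ys) = x :: y :: ys from by
        simp [PySem.List.insertBy, hb]]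
      cases hE : pvE x with
      | true =>
        rw [List.find?_cons_of_pos hE]
        cases hq : (y :: ys).find? pvE with
        | none => simp
        | some q =>
          have hqmem := List.mem_of_find?_eq_some hq
          have hql : q.2 < x.2 := by
            rcases List.mem_cons.mp hqmem with hqy | hm
            · rw [hqy]; omega
            · have := h.1 q hm; omega
          simp [hql]
      | false =>
        rw [List.find?_cons_of_neg (by simp [hE])]
        simp
    · have hxy : ¬ y.2 < x.2 := by simpa [pvBf] using hb
      rw [show PySem.List.insertBy pvBf x (y :: ys) = y :: PySem.List.insertBy pvBf x ys from by
        simp [PySem.List.insertBy, Bool.eq_false_iff.mpr hb]]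
      cases hEy : pvE y with
      | true =>
        rw [List.find?_cons_of_pos hEy, List.find?_cons_of_pos hEy]
        cases hE : pvE x with
        | true => simp [if_neg hxy]
        -- (hE not needed here)
        | false => simp
      | false =>
        rw [List.find?_cons_of_neg (by simp [hEy]), List.find?_cons_of_neg (by simp [hEy])]
        exact ih h.2

-- the invariant tying B's argmax fold to A's sorted-list scan
lemma pvMain_inv (l : List (Int × Int)) (hl : ∀ p ∈ l, 1 ≤ p.2) :
    ∀ (acc : List (Int × Int)) (b : Int × Int),
      acc.Pairwise (fun a c => c.2 ≤ a.2) →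
      ((acc.find? pvE = none ∧ b = ((0 : Int), (0 : Int))) ∨ acc.find? pvE = some b) →
      (((l.foldl (fun a x => PySem.List.insertBy pvBf x a) acc).find? pvE = none ∧
          l.foldl pvG b = ((0 : Int), (0 : Int))) ∨
        (l.foldl (fun a x => PySem.List.insertBy pvBf x a) acc).find? pvE = some (l.foldl pvG b)) := by
  revert hl
  induction l with
  | nil => intro _ acc b _ hinv; exact hinv
  | cons x rest ih =>
    intro hl acc b hpw hinv
    simp only [List.foldl_cons]
    have hx : (1 : Int) ≤ x.2 := hl x (List.mem_cons_self)
    refine ih (fun p hp => hl p (List.mem_cons_of_mem _ hp)) _ _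
      (pvPairwise_insertBy x acc hpw) ?_
    rw [pvFind?_insertBy x acc hpw]
    cases hE : pvE x with
    | false =>
      have hm : ¬ (2 : Int) ∣ x.1 := by simpa [pvE] using hE
      have : pvG b x = b := by simp [pvG, hm]
      rw [this]
      exact hinv
    | true =>
      have hm : (2 : Int) ∣ x.1 := by simpa [pvE] using hE
      rcases hinv with ⟨hn, hb⟩ | hs
      · rw [hn]
        right
        have h0 : b.2 < x.2 := by rw [hb]; omega
        simp [pvG, hm, h0]
      · rw [hs]
        right
        by_cases hlt : b.2 < x.2
        · simp [pvG, hm, hlt]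
        · simp [pvG, hm, hlt]

lemma pvPickUnit_eq_find? (l : List (Int × Int)) :
    pvPickUnit l =
      match l.find? pvE with
      | none => 4
      | some p => if PySem.Int.mod p.1 4 ≠ 0 then 2 else 4 := by
  induction l with
  | nil => rfl
  | cons p rest ih =>
    obtain ⟨size, c⟩ := p
    by_cases h : (2 : Int) ∣ size
    · by_cases h4 : (4 : Int) ∣ size <;>
        simp [pvPickUnit, pvE, h, h4]
    · simp [pvPickUnit, pvE, h, ih]

-- every count recorded in the sizes dict is at least 1
lemma pvSizes_pos_aux (lines : List String) (d : PySem.Dict Int Int)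
    (hd : ∀ p ∈ d.items, (1 : Int) ≤ p.2) :
    ∀ p ∈ (lines.foldl (fun sizes ln =>
      if PySem.Str.startswith ln " " then
        let count := pvLeadSpaces ln
        if count ≠ 0 then sizes.insert count (sizes.getD count 0 + 1) else sizes
      else sizes) d).items, (1 : Int) ≤ p.2 := by
  induction lines generalizing d with
  | nil => exact hd
  | cons ln rest ih =>
    simp only [List.foldl_cons]
    apply ih
    split
    · split
      · intro p hp
        rw [PySem.Dict.mem_items_insert] at hp
        rcases hp with hp | hp
        · subst hp
          rw [PySem.Dict.getD_eq_get?_getD]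
          cases hg : d.get? (pvLeadSpaces ln) with
          | none => simp
          | some v =>
            have := hd _ (PySem.Dict.mem_items_of_get?_eq_some d hg)
            simp at this ⊢; omega
        · exact hd _ hp.1
      · exact hd
    · exact hd

lemma pvSizes_pos (lines : List String) : ∀ p ∈ (pvSizes lines).items, (1 : Int) ≤ p.2 := by
  exact pvSizes_pos_aux lines PySem.Dict.empty (by intro p hp; simp [PySem.Dict.empty] at hp)

lemma pvUnit_eq (lines : List String) : pvUnitA lines = pvUnitB lines := by
  have hmain := pvMain_inv (pvSizes lines).items (pvSizes_pos lines) [] ((0 : Int), (0 : Int))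
    List.Pairwise.nil (Or.inl ⟨rfl, rfl⟩)
  unfold pvUnitA pvUnitB pvBest
  by_cases hni : (pvSizes lines).items = []
  · rw [if_neg (by simp [hni]), hni]
    decide
  · rw [if_pos hni, pvPickUnit_eq_find?]
    have hsorted : PySem.List.sorted (pvSizes lines).items (fun x => x.2) true
        = (pvSizes lines).items.foldl (fun a x => PySem.List.insertBy pvBf x a) [] :=
      PySem.List.sorted_rev_eq_foldl_insertBy _ _
    rw [hsorted]
    rcases hmain with ⟨hn, hb⟩ | hs
    · rw [hn, hb]; decide
    · rw [hs]

lemma pvUnitB_ne_zero (lines : List String) : pvUnitB lines ≠ 0 := by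
  unfold pvUnitB; split <;> decide

lemma pvLoop2 (u : Int) (hu : u ≠ 0) (lines : List String) :
    ∀ st : Int × Int, (lines.foldl (pvFA u) st).2 = lines.foldl (pvFB u) st.2 := by
  have key : ∀ (st : Int × Int) (ln : String), (pvFA u st ln).2 = pvFB u st.2 ln := by
    intro st ln
    unfold pvFA pvFB
    split
    · rfl
    · generalize (if PySem.Str.startswith ln "\t" then (PySem.Str.count ln "\t" : Int)
          else PySem.Int.floordiv (pvLeadSpaces ln) u) = lvl
      show (if lvl > st.2 then (lvl, lvl) else (lvl, st.2)).2 = max st.2 lvl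
      split <;> simp <;> omega
  induction lines with
  | nil => intro st; rfl
  | cons ln rest ih =>
    intro st
    simp only [List.foldl_cons]
    rw [ih, key]

-- ===== VERDICT (by name: the statement is the Claim_ definition above) =====
theorem calculate_max_indent_py_spec : Claim_equal_calculate_max_indent_py := by
  intro lines _
  show calculate_max_indent_py lines = calculate_max_indent_py_alt lines
  rw [pvA_unfold, pvB_unfold, pvUnit_eq,
    pvLoop2 (pvUnitB lines) (pvUnitB_ne_zero lines) lines]
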